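-- pv_equiv track=rewrite | github.com/adeak/AoC2022 | day23.py | ground_covered
-- ===== SOURCE A (Python) =====
-- def ground_covered(board):
--     extents = [0, 0, 0, 0]
--     for elf in board:
--         extents[0] = min(extents[0], elf[0])  # xmin
--         extents[1] = max(extents[1], elf[0])  # xmax
--         extents[2] = min(extents[2], elf[1])  # ymin
--         extents[3] = max(extents[3], elf[1])  # ymax
--     return (extents[1] - extents[0] + 1) * (extents[3] - extents[2] + 1) - len(board)
-- ===== SOURCE B (Python) =====
-- def ground_covered(board):
--     xs = sorted([0] + [x for x, _ in board])
--     ys = sorted([0] + [y for _, y in board])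
--     return (xs[-1] - xs[0] + 1) * (ys[-1] - ys[0] + 1) - len(board)
-- ===== Notes on version B (the rewrite author's own statement) =====
-- stated objective: alternative
-- what changed: Replaces A's fused single-pass running min/max loop over a mutated 4-slot extents list by a sort-based algorithm: each 0-prepended coordinate list is sorted and the extrema are read off the sorted list's endpoints.
import Mathlib
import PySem

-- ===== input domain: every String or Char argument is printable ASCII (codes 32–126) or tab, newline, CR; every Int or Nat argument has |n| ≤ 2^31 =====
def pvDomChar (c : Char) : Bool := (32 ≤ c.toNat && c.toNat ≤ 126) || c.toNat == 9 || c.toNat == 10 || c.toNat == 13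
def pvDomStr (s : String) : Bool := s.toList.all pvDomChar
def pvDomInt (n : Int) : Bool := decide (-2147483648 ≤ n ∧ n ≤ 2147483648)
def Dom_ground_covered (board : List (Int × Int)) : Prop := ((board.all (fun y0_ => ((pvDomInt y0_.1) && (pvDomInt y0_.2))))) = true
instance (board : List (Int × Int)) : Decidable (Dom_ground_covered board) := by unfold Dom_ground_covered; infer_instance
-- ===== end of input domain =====

-- B replaces A's fused running min/max loop by a different algorithm: sort each
-- 0-prepended coordinate list and read the extrema off the sorted endpoints (alternative).


-- ===== PORT A =====
-- extents = [0,0,0,0] kept as a 4-tuple (xmin, xmax, ymin, ymax); the loop is a foldl.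
def ground_covered (board : List (Int × Int)) : Int :=
  let e := board.foldl
    (fun (e : Int × Int × Int × Int) elf =>
      (min e.1 elf.1, max e.2.1 elf.1, min e.2.2.1 elf.2, max e.2.2.2 elf.2))
    (0, 0, 0, 0)
  (e.2.1 - e.1 + 1) * (e.2.2.2 - e.2.2.1 + 1) - board.length

-- ===== PORT B =====
-- sorted([0] + [x for x,_ in board]) = PySem.List.sorted on 0 :: projection; the lists are
-- nonempty, so xs[0]/xs[-1] (PySem.List.pyGet?) always return some _ and `.getD 0` is unreachable.
def ground_covered_alt (board : List (Int × Int)) : Int :=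
  let xs := PySem.List.sorted ((0 : Int) :: board.map (fun e => e.1)) (fun x => x) false
  let ys := PySem.List.sorted ((0 : Int) :: board.map (fun e => e.2)) (fun x => x) false
  ((PySem.List.pyGet? xs (-1)).getD 0 - (PySem.List.pyGet? xs 0).getD 0 + 1) *
    ((PySem.List.pyGet? ys (-1)).getD 0 - (PySem.List.pyGet? ys 0).getD 0 + 1) - board.length

-- ===== PRECONDITION & SPEC =====
def Spec_ground_covered (board : List (Int × Int)) (out : Int) : Prop := out = ground_covered_alt board
instance (board : List (Int × Int)) (out : Int) : Decidable (Spec_ground_covered board out) := by unfold Spec_ground_covered; infer_instance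

-- ===== CLAIM (what is proved, stated in full; the proofs are below) =====
def Claim_equal_ground_covered : Prop := ∀ (board : List (Int × Int)), Dom_ground_covered board → Spec_ground_covered board (ground_covered board)

-- ===== LEMMAS AND PROOFS =====
-- A's fused fold over the 4-tuple equals the four componentwise folds over the projections.
theorem fold4_eq (board : List (Int × Int)) :
    ∀ a b c d : Int,
      board.foldl
        (fun (e : Int × Int × Int × Int) elf =>
          (min e.1 elf.1, max e.2.1 elf.1, min e.2.2.1 elf.2, max e.2.2.2 elf.2))
        (a, b, c, d)
      = ((board.map (fun e => e.1)).foldl min a,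
         (board.map (fun e => e.1)).foldl max b,
         (board.map (fun e => e.2)).foldl min c,
         (board.map (fun e => e.2)).foldl max d) := by
  induction board with
  | nil => intro a b c d; rfl
  | cons hd tl ih => intro a b c d; simp [List.foldl, ih]

-- every member of a ≤-pairwise list is ≤ its last element
theorem le_getLast_of_pairwise : ∀ (s : List Int), s.Pairwise (· ≤ ·) →
    ∀ y ∈ s, ∀ (hne : s ≠ []), y ≤ s.getLast hne := by
  intro s
  induction s with
  | nil => intro _ y hy; cases hy
  | cons h t ih =>
    intro hp y hy hne
    rcases List.pairwise_cons.mp hp with ⟨hhd, ht⟩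
    cases t with
    | nil => simp at hy; simp [hy]
    | cons h2 t2 =>
      rw [List.getLast_cons (by simp)]
      rcases List.mem_cons.mp hy with rfl | hy'
      · exact hhd _ (List.getLast_mem (by simp))
      · exact ih ht _ hy' (by simp)

-- first element of sorted (a :: l) is the running min; last element is the running max
theorem sorted_head_eq_min (a : Int) (l : List Int) :
    (PySem.List.pyGet? (PySem.List.sorted (a :: l) (fun x => x) false) 0).getD 0
      = l.foldl min a := by
  rcases hs : PySem.List.sorted (a :: l) (fun x => x) false with _ | ⟨h, t⟩
  · exact absurd hs (by simp [PySem.List.sorted_eq_nil_iff])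
  · rw [PySem.List.pyGet?_zero_cons]
    have hperm := PySem.List.sorted_perm (a :: l) (fun x => x) false
    rw [hs] at hperm
    have hmem : h ∈ a :: l := hperm.mem_iff.mp (by simp)
    have hle := PySem.List.key_head_sorted_le (xs := a :: l) (key := fun x => x) hs
    have hmin := PySem.List.foldl_min_le l a
    have hminmem : l.foldl min a = a ∨ l.foldl min a ∈ l := PySem.List.foldl_min_mem l a
    have h1 : h ≤ l.foldl min a := by
      rcases hminmem with he | hm
      · rw [he]; exact hle a (by simp)
      · exact hle _ (by simp [hm])
    have h2 : l.foldl min a ≤ h := by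
      rcases List.mem_cons.mp hmem with rfl | hm
      · exact hmin.1
      · exact hmin.2 _ hm
    simp [le_antisymm h1 h2]

theorem sorted_last_eq_max (a : Int) (l : List Int) :
    (PySem.List.pyGet? (PySem.List.sorted (a :: l) (fun x => x) false) (-1)).getD 0
      = l.foldl max a := by
  have hne : PySem.List.sorted (a :: l) (fun x => x) false ≠ [] := by
    simp [PySem.List.sorted_eq_nil_iff]
  rw [PySem.List.pyGet?_neg_one, List.getLast?_eq_some_getLast hne]
  have hperm := PySem.List.sorted_perm (a :: l) (fun x => x) false
  have hpair := PySem.List.sorted_pairwise (xs := a :: l) (key := fun x => x)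
  set s := PySem.List.sorted (a :: l) (fun x => x) false with hsdef
  have hLmem : s.getLast hne ∈ a :: l := hperm.mem_iff.mp (List.getLast_mem hne)
  have hmax := PySem.List.le_foldl_max l a
  have hmaxmem : l.foldl max a = a ∨ l.foldl max a ∈ l := PySem.List.foldl_max_mem l a
  have h1 : s.getLast hne ≤ l.foldl max a := by
    rcases List.mem_cons.mp hLmem with he | hm
    · rw [he]; exact hmax.1
    · exact hmax.2 _ hm
  have h2 : l.foldl max a ≤ s.getLast hne := by
    have hmem : l.foldl max a ∈ s := by
      refine hperm.mem_iff.mpr ?_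
      rcases hmaxmem with he | hm
      · simp [he]
      · simp [hm]
    exact le_getLast_of_pairwise s hpair _ hmem hne
  exact le_antisymm h1 h2

-- ===== VERDICT (by name: the statement is the Claim_ definition above) =====
theorem ground_covered_spec : Claim_equal_ground_covered := by
  intro board _
  unfold Spec_ground_covered ground_covered ground_covered_alt
  simp only [fold4_eq, sorted_head_eq_min, sorted_last_eq_max]
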